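-- pv_equiv track=rewrite | github.com/RemonComputer/hacker_rank_problems | Mathmatics/Leonardos_Prime_Factors.py | primeCount
-- ===== SOURCE A (Python) =====
-- def isPrime(prime_factors, n):
--     for factor in prime_factors:
--         if n % factor == 0:
--             return False
--     return True
--
-- def primeCount(n):
--     #
--     # Write your code here.
--     #
--     if n <= 1:
--         return 0
--     prime_factors = [2]
--     product=2
--     current_number = 2
--     while product <= n:
--         current_number += 1
--         if isPrime(prime_factors, current_number):
--             prime_factors.append(current_number)
--             product *= current_number
--     return len(prime_factors) - 1
-- ===== SOURCE B (Python) =====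
-- def _isPrime(m):
--     d = 2
--     while d * d <= m:
--         if m % d == 0:
--             return False
--         d += 1
--     return True
--
-- def primeCount(n):
--     if n <= 1:
--         return 0
--     count = 1
--     product = 2
--     candidate = 2
--     while product <= n:
--         candidate += 1
--         if _isPrime(candidate):
--             count += 1
--             product *= candidate
--     return count - 1
-- ===== Notes on version B (the rewrite author's own statement) =====
-- stated objective: alternative
-- what changed: B drops A's accumulated prime-factor list entirely: each candidate is tested by a standalone trial division that stops at the candidate's square root, so the loop keeps only a running count and primorial instead of a growing list scanned per candidate.
import Mathlib
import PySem

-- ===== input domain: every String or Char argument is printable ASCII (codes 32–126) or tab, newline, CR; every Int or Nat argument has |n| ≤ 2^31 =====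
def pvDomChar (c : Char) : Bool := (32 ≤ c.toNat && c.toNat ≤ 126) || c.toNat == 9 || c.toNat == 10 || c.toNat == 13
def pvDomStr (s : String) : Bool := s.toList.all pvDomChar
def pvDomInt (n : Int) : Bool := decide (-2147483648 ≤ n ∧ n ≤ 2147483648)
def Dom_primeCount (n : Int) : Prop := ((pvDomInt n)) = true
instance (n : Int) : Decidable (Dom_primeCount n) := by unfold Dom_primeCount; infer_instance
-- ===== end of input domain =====

-- B drops A's accumulated prime list: it tests each candidate by standalone trial
-- division up to its square root and keeps only a running count and primorial (objective: alternative).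

-- ===== PORT A =====
-- isPrime(prime_factors, n): early-return loop over the factor list
def isPrimeA (factors : List Int) (n : Int) : Bool :=
  match factors with
  | [] => true
  | f :: rest => if PySem.Int.mod n f == 0 then false else isPrimeA rest n

-- the while loop of A; fuel bounds the number of iterations (the Python loop is
-- unbounded; n.toNat + 4 iterations are far more than the loop ever uses, since the
-- running primorial exceeds n long before the candidate reaches n)
def loopA (n : Int) : Nat → List Int → Int → Int → List Int
  | 0, factors, _, _ => factors
  | fuel + 1, factors, product, current =>
    if product ≤ n then
      let c := current + 1
      if isPrimeA factors c then loopA n fuel (factors ++ [c]) (product * c) c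
      else loopA n fuel factors product c
    else factors

def primeCount (n : Int) : Int :=
  if n ≤ 1 then 0
  else ((loopA n (n.toNat + 4) [2] 2 2).length : Int) - 1

-- ===== PORT B =====
-- _isPrime(m): trial division, while d*d <= m (fuel m.toNat is more than the number of steps)
def trialDiv (m : Int) : Int → Nat → Bool
  | _, 0 => true
  | d, fuel + 1 =>
    if d * d ≤ m then
      if PySem.Int.mod m d == 0 then false else trialDiv m (d + 1) fuel
    else true

def isPrimeB (m : Int) : Bool := trialDiv m 2 m.toNat

-- B's while loop: only product / count / candidate
def loopB (n : Int) : Nat → Int → Int → Int → Int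
  | 0, _, count, _ => count
  | fuel + 1, product, count, candidate =>
    if product ≤ n then
      let c := candidate + 1
      if isPrimeB c then loopB n fuel (product * c) (count + 1) c
      else loopB n fuel product count c
    else count

def primeCount_alt (n : Int) : Int :=
  if n ≤ 1 then 0
  else loopB n (n.toNat + 4) 2 1 2 - 1

-- ===== PRECONDITION & SPEC =====
def Spec_primeCount (n : Int) (out : Int) : Prop := out = primeCount_alt n
instance (n : Int) (out : Int) : Decidable (Spec_primeCount n out) := by unfold Spec_primeCount; infer_instance

-- ===== CLAIM (what is proved, stated in full; the proofs are below) =====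
def Claim_equal_primeCount : Prop := ∀ (n : Int), Dom_primeCount n → Spec_primeCount n (primeCount n)

-- ===== LEMMAS AND PROOFS =====

-- mod-zero is divisibility
lemma mod_zero_iff_dvd (a b : Int) : PySem.Int.mod a b = 0 ↔ b ∣ a :=
  PySem.Int.mod_eq_zero_iff_dvd a b

-- divisibility transfers from Int to toNat for nonnegative integers
lemma toNat_dvd_toNat {a b : Int} (ha : 0 ≤ a) (hb : 0 ≤ b) (h : a ∣ b) :
    a.toNat ∣ b.toNat :=
  Int.natCast_dvd_natCast.mp (by rwa [Int.toNat_of_nonneg ha, Int.toNat_of_nonneg hb])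

-- A's list test says: no listed factor divides n
lemma isPrimeA_iff (factors : List Int) (n : Int) :
    isPrimeA factors n = true ↔ ∀ f ∈ factors, PySem.Int.mod n f ≠ 0 := by
  induction factors with
  | nil => simp [isPrimeA]
  | cons f rest ih =>
    simp only [isPrimeA]
    by_cases h : PySem.Int.mod n f = 0 <;> simp [h, ih]

-- trial division: with enough fuel, "true" means no divisor d ≤ √m from the start point on
lemma trialDiv_iff (m : Int) (_hm : 3 ≤ m) :
    ∀ (fuel : Nat) (d : Int), 2 ≤ d → m < (d + fuel) * (d + fuel) →
      (trialDiv m d fuel = true ↔ ∀ e : Int, d ≤ e → e * e ≤ m → ¬ (e ∣ m)) := by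
  intro fuel
  induction fuel with
  | zero =>
    intro d hd hbound
    simp only [trialDiv, true_iff]
    intro e hde hsq
    exfalso
    push_cast at hbound
    nlinarith
  | succ fuel ih =>
    intro d hd hbound
    simp only [trialDiv]
    by_cases h1 : d * d ≤ m
    · simp only [h1, if_pos]
      by_cases h2 : PySem.Int.mod m d = 0
      · have hdvd : d ∣ m := (mod_zero_iff_dvd m d).mp h2
        simp only [h2]
        simp only [beq_self_eq_true, if_pos]
        constructor
        · intro hfalse; exact absurd hfalse (by simp)
        · intro hall; exact absurd (hall d le_rfl h1 hdvd) (fun h => h)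
      · have hne : (PySem.Int.mod m d == 0) = false := by
          simp [h2]
        simp only [hne, Bool.false_eq_true, if_false]
        have hbound' : m < (d + 1 + (fuel : Int)) * (d + 1 + (fuel : Int)) := by
          push_cast at hbound ⊢; linarith
        rw [ih (d + 1) (by omega) hbound']
        constructor
        · intro hall e hde hsq
          rcases eq_or_lt_of_le hde with heq | hlt
          · intro hdvd
            exact h2 ((mod_zero_iff_dvd m d).mpr (heq ▸ hdvd))
          · exact hall e (by omega) hsq
        · intro hall e hde hsq
          exact hall e (by omega) hsq
    · simp only [h1, if_false, true_iff]
      intro e hde hsq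
      exfalso
      have : d * d ≤ e * e := by nlinarith
      omega

-- the two tests meet at Nat.Prime
lemma no_small_div_iff_prime (m : Int) (hm : 3 ≤ m) :
    (∀ e : Int, 2 ≤ e → e * e ≤ m → ¬ (e ∣ m)) ↔ Nat.Prime m.toNat := by
  have hm0 : (m.toNat : Int) = m := Int.toNat_of_nonneg (by omega)
  have hm3 : 3 ≤ m.toNat := by omega
  constructor
  · intro hall
    by_contra hnp
    set p := m.toNat.minFac with hp
    have hpp : p.Prime := Nat.minFac_prime (by omega)
    have hpd : p ∣ m.toNat := Nat.minFac_dvd _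
    have hsq : p ^ 2 ≤ m.toNat := Nat.minFac_sq_le_self (by omega) hnp
    refine hall (p : Int) (by exact_mod_cast hpp.two_le) ?_ ?_
    · have : ((p * p : Nat) : Int) ≤ (m.toNat : Int) := by
        exact_mod_cast (by nlinarith [hsq] : p * p ≤ m.toNat)
      push_cast at this; omega
    · rw [← hm0]; exact_mod_cast hpd
  · intro hprime e h2 hsq hdvd
    have he0 : 0 < e := by omega
    have : e.toNat ∣ m.toNat := toNat_dvd_toNat (by omega) (by omega) hdvd
    rcases (Nat.Prime.eq_one_or_self_of_dvd hprime _ this) with h1 | h1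
    · omega
    · have : e = m := by omega
      nlinarith

lemma isPrimeB_iff (m : Int) (hm : 3 ≤ m) :
    isPrimeB m = true ↔ Nat.Prime m.toNat := by
  unfold isPrimeB
  rw [trialDiv_iff m hm m.toNat 2 (by omega) (by nlinarith [Int.toNat_of_nonneg (show (0:Int) ≤ m by omega)])]
  exact no_small_div_iff_prime m hm

-- invariant: factors = exactly the primes in [2, current]
def LoopInv (factors : List Int) (current : Int) : Prop :=
  2 ≤ current ∧
  (∀ f ∈ factors, 2 ≤ f ∧ f ≤ current ∧ Nat.Prime f.toNat) ∧
  (∀ p : Int, 2 ≤ p → p ≤ current → (p ∈ factors ↔ Nat.Prime p.toNat))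

lemma isPrimeA_loopinv (factors : List Int) (current : Int) (h : LoopInv factors current) :
    isPrimeA factors (current + 1) = true ↔ Nat.Prime (current + 1).toNat := by
  obtain ⟨hcur, hmem, hiff⟩ := h
  set c : Int := current + 1 with hc
  have hc3 : 3 ≤ c := by omega
  have hc0 : (c.toNat : Int) = c := Int.toNat_of_nonneg (by omega)
  rw [isPrimeA_iff]
  constructor
  · intro hall
    by_contra hnp
    set p := c.toNat.minFac with hp
    have hpp : p.Prime := Nat.minFac_prime (by omega)
    have hpd : p ∣ c.toNat := Nat.minFac_dvd _
    have hsq : p ^ 2 ≤ c.toNat := Nat.minFac_sq_le_self (by omega) hnp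
    have hple : (p : Int) ≤ current := by
      have h2p : 2 ≤ p := hpp.two_le
      have : p < c.toNat := by nlinarith
      omega
    have hpmem : (p : Int) ∈ factors := by
      rw [hiff (p : Int) (by exact_mod_cast hpp.two_le) hple]
      simpa using hpp
    refine hall _ hpmem ?_
    rw [mod_zero_iff_dvd]
    rw [← hc0]
    exact_mod_cast hpd
  · intro hprime f hf
    obtain ⟨hf2, hfle, hfp⟩ := hmem f hf
    rw [Ne, mod_zero_iff_dvd]
    intro hdvd
    have : f.toNat ∣ c.toNat := toNat_dvd_toNat (by omega) (by omega) hdvd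
    rcases Nat.Prime.eq_one_or_self_of_dvd hprime _ this with h1 | h1
    · omega
    · omega

lemma loopinv_step_prime (factors : List Int) (current : Int) (h : LoopInv factors current)
    (hp : Nat.Prime (current + 1).toNat) : LoopInv (factors ++ [current + 1]) (current + 1) := by
  obtain ⟨hcur, hmem, hiff⟩ := h
  refine ⟨by omega, ?_, ?_⟩
  · intro f hf
    rcases List.mem_append.mp hf with hf | hf
    · obtain ⟨a, b, c⟩ := hmem f hf; exact ⟨a, by omega, c⟩
    · simp at hf; subst hf; exact ⟨by omega, le_rfl, hp⟩
  · intro p h2 hle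
    rcases eq_or_lt_of_le hle with heq | hlt
    · subst heq; simp [hp]
    · have hple : p ≤ current := by omega
      rw [List.mem_append]
      rw [← hiff p h2 hple]
      constructor
      · rintro (hin | hin)
        · exact hin
        · simp at hin; omega
      · intro hin; exact Or.inl hin

lemma loopinv_step_comp (factors : List Int) (current : Int) (h : LoopInv factors current)
    (hp : ¬ Nat.Prime (current + 1).toNat) : LoopInv factors (current + 1) := by
  obtain ⟨hcur, hmem, hiff⟩ := h
  refine ⟨by omega, ?_, ?_⟩
  · intro f hf
    obtain ⟨a, b, c⟩ := hmem f hf; exact ⟨a, by omega, c⟩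
  · intro p h2 hle
    rcases eq_or_lt_of_le hle with heq | hlt
    · subst heq
      simp only [hp, iff_false]
      intro hin
      obtain ⟨_, hb, _⟩ := hmem _ hin
      omega
    · exact hiff p h2 (by omega)

-- bisimulation of the two loops
lemma loop_bisim (n : Int) : ∀ (fuel : Nat) (factors : List Int) (product current : Int),
    LoopInv factors current →
    loopB n fuel product (factors.length : Int) current = ((loopA n fuel factors product current).length : Int) := by
  intro fuel
  induction fuel with
  | zero => intro factors product current _; simp [loopA, loopB]
  | succ fuel ih =>
    intro factors product current hInv
    simp only [loopA, loopB]
    by_cases hle : product ≤ n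
    · simp only [hle, if_pos]
      have hc3 : 3 ≤ current + 1 := by have := hInv.1; omega
      have htest : isPrimeB (current + 1) = isPrimeA factors (current + 1) := by
        by_cases hp : Nat.Prime (current + 1).toNat
        · rw [(isPrimeB_iff _ hc3).mpr hp, (isPrimeA_loopinv _ _ hInv).mpr hp]
        · have b1 : isPrimeB (current + 1) = false := by
            rcases Bool.eq_false_or_eq_true (isPrimeB (current + 1)) with h | h
            · exact absurd ((isPrimeB_iff _ hc3).mp h) hp
            · exact h
          have b2 : isPrimeA factors (current + 1) = false := by
            rcases Bool.eq_false_or_eq_true (isPrimeA factors (current + 1)) with h | h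
            · exact absurd ((isPrimeA_loopinv _ _ hInv).mp h) hp
            · exact h
          rw [b1, b2]
      rw [htest]
      by_cases hpr : isPrimeA factors (current + 1) = true
      · simp only [hpr, if_pos]
        have := ih (factors ++ [current + 1]) (product * (current + 1)) (current + 1)
          (loopinv_step_prime factors current hInv ((isPrimeA_loopinv _ _ hInv).mp hpr))
        simp only [List.length_append, List.length_cons, List.length_nil] at this
        rw [← this]
        norm_num
      · have hpr' : isPrimeA factors (current + 1) = false := by
          rcases Bool.eq_false_or_eq_true (isPrimeA factors (current + 1)) with h | h
          · exact absurd h hpr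
          · exact h
        have hnp : ¬ Nat.Prime (current + 1).toNat := fun hp =>
          by rw [(isPrimeA_loopinv _ _ hInv).mpr hp] at hpr'; exact absurd hpr' (by simp)
        simp only [hpr', Bool.false_eq_true, if_false]
        exact ih factors product (current + 1) (loopinv_step_comp factors current hInv hnp)
    · simp [hle]

-- ===== VERDICT (by name: the statement is the Claim_ definition above) =====
theorem primeCount_spec : Claim_equal_primeCount := by
  intro n _
  unfold Spec_primeCount primeCount primeCount_alt
  by_cases h : n ≤ 1
  · simp [h]
  · have hInv : LoopInv [2] 2 := by
      refine ⟨le_refl _, ?_, ?_⟩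
      · intro f hf; simp at hf; subst hf; exact ⟨le_refl _, le_refl _, by decide⟩
      · intro p h2 hle
        have : p = 2 := le_antisymm hle h2
        subst this; simp; decide
    have := loop_bisim n (n.toNat + 4) [2] 2 2 hInv
    simp only [List.length_cons, List.length_nil] at this
    simp [h, ← this]
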